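-- pv_equiv track=rewrite | github.com/Dev-Sirbhaiya/AEGIS | aegis/backend/services/simulation/generator.py | _compress_event_timeline
-- ===== SOURCE A (Python) =====
-- from typing import Dict, List, Optional, Any
--
-- def _compress_event_timeline(events: List[Dict]) -> List[Dict]:
--     """Compress authored timelines into a 3-5 second demo cadence."""
--     if not events:
--         return []
--
--     compressed: List[Dict] = []
--     offset = 0
--
--     for index, event in enumerate(events):
--         cloned = dict(event)
--         if index == 0:
--             cloned["time_offset_seconds"] = 0
--         else:
--             offset += 3 + ((index - 1) % 3)
--             cloned["time_offset_seconds"] = offset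
--         compressed.append(cloned)
--
--     return compressed
-- ===== SOURCE B (Python) =====
-- from typing import Dict, List
--
--
-- def _compress_event_timeline(events: List[Dict]) -> List[Dict]:
--     """Compress authored timelines into a 3-5 second demo cadence.
--
--     Each event's offset is computed independently by a closed form instead of
--     a running accumulator: the cumulative sum of 3 + ((j-1) % 3) over j=1..i.
--     """
--     def offset_at(i: int) -> int:
--         if i == 0:
--             return 0
--         return 3 * i + 3 * (i // 3) + (1 if i % 3 == 2 else 0)
--
--     return [{**event, "time_offset_seconds": offset_at(i)}
--             for i, event in enumerate(events)]
-- ===== Notes on version B (the rewrite author's own statement) =====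
-- stated objective: alternative
-- what changed: Replaced the running offset accumulator with a per-index closed-form offset (3*i + 3*(i//3) + [0,0,1][i%3]), so each event is mapped independently with no inter-iteration state.
import Mathlib
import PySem

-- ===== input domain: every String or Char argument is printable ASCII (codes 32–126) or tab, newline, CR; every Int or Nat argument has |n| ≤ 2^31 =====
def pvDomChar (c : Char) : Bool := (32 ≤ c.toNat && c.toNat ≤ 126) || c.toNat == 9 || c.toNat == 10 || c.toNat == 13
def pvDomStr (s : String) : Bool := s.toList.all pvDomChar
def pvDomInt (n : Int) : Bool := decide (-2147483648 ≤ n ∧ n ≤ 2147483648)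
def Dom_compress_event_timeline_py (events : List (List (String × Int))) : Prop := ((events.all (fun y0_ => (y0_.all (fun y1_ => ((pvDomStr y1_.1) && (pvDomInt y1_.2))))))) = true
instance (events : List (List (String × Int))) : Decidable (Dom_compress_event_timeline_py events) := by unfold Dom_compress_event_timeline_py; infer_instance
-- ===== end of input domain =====

-- B replaces A's running offset accumulator with a per-index closed-form offset; alternative decomposition, same O(n) cost.


-- ===== PORT A =====
def compress_event_timeline_py (events : List (List (String × Int))) : List (List (String × Int)) :=
  if events = [] then []
  else
    (((PySem.List.enumerate events 0).foldl
        (fun (st : List (List (String × Int)) × Int) p =>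
          let cloned := PySem.Dict.ofList p.2
          if p.1 = 0 then
            (st.1 ++ [(cloned.insert "time_offset_seconds" 0).items], st.2)
          else
            let offset := st.2 + (3 + PySem.Int.mod (p.1 - 1) 3)
            (st.1 ++ [(cloned.insert "time_offset_seconds" offset).items], offset))
        ([], 0))).1

-- ===== PORT B =====
def pvOffsetAt (i : Int) : Int :=
  if i = 0 then 0
  else 3 * i + 3 * PySem.Int.floordiv i 3 + (if PySem.Int.mod i 3 = 2 then 1 else 0)

def compress_event_timeline_py_alt (events : List (List (String × Int))) : List (List (String × Int)) :=
  (PySem.List.enumerate events 0).map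
    (fun p => ((PySem.Dict.ofList p.2).insert "time_offset_seconds" (pvOffsetAt p.1)).items)

-- ===== PRECONDITION & SPEC =====
def Spec_compress_event_timeline_py (events : List (List (String × Int))) (out : List (List (String × Int))) : Prop := out = compress_event_timeline_py_alt events
instance (events : List (List (String × Int))) (out : List (List (String × Int))) : Decidable (Spec_compress_event_timeline_py events out) := by unfold Spec_compress_event_timeline_py; infer_instance

-- ===== CLAIM (what is proved, stated in full; the proofs are below) =====
def Claim_equal_compress_event_timeline_py : Prop := ∀ (events : List (List (String × Int))), Dom_compress_event_timeline_py events → Spec_compress_event_timeline_py events (compress_event_timeline_py events)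

-- ===== LEMMAS AND PROOFS =====


-- closed-form step: the accumulator update of A advances pvOffsetAt by one index
lemma pvOffsetAt_succ (n : Nat) :
    pvOffsetAt ((n : Int) + 1) = pvOffsetAt (n : Int) + (3 + PySem.Int.mod (n : Int) 3) := by
  have hm : ∀ a : Int, PySem.Int.mod a 3 = a % 3 := fun a => PySem.Int.mod_eq_emod_of_pos (by norm_num)
  have hd : ∀ a : Int, PySem.Int.floordiv a 3 = a / 3 := fun a => PySem.Int.floordiv_eq_ediv_of_pos (by norm_num)
  simp only [pvOffsetAt, hm, hd]
  split_ifs <;> omega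

-- loop invariant: the fold over the tail (indices ≥ n+1), entered with the accumulated
-- offset pvOffsetAt n, appends exactly the closed-form mapped elements
lemma pvLoop (xs : List (List (String × Int))) :
    ∀ (n : Nat) (acc : List (List (String × Int))) (off : Int), off = pvOffsetAt (n : Int) →
    ((PySem.List.enumerate xs ((n : Int) + 1)).foldl
        (fun (st : List (List (String × Int)) × Int) p =>
          let cloned := PySem.Dict.ofList p.2
          if p.1 = 0 then
            (st.1 ++ [(cloned.insert "time_offset_seconds" 0).items], st.2)
          else
            let offset := st.2 + (3 + PySem.Int.mod (p.1 - 1) 3)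
            (st.1 ++ [(cloned.insert "time_offset_seconds" offset).items], offset))
        (acc, off)).1
    = acc ++ (PySem.List.enumerate xs ((n : Int) + 1)).map
        (fun p => ((PySem.Dict.ofList p.2).insert "time_offset_seconds" (pvOffsetAt p.1)).items) := by
  induction xs with
  | nil => intro n acc off _; simp [PySem.List.enumerate_nil]
  | cons x xs ih =>
    intro n acc off hoff
    rw [PySem.List.enumerate_cons]
    have hne : ((n : Int) + 1) ≠ 0 := by omega
    simp only [List.foldl_cons, List.map_cons, hne, if_false]
    have hoff' : off + (3 + PySem.Int.mod ((n : Int) + 1 - 1) 3) = pvOffsetAt ((n + 1 : Nat) : Int) := by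
      have h : ((n : Int) + 1 - 1) = (n : Int) := by ring
      rw [h, hoff, ← pvOffsetAt_succ]; norm_cast
    have h1 : ((n : Int) + 1 + 1) = (((n + 1 : Nat) : Int) + 1) := by push_cast; ring
    rw [hoff', h1, ih (n + 1) _ _ rfl]
    have h2 : ((n : Int) + 1) = ((n + 1 : Nat) : Int) := by push_cast; ring
    rw [h2]
    simp

-- ===== VERDICT (by name: the statement is the Claim_ definition above) =====
theorem compress_event_timeline_py_spec : Claim_equal_compress_event_timeline_py := by
  intro events _
  unfold Spec_compress_event_timeline_py compress_event_timeline_py compress_event_timeline_py_alt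
  cases events with
  | nil => simp [PySem.List.enumerate_nil]
  | cons e rest =>
    rw [if_neg (by simp : ¬ (e :: rest) = [])]
    rw [PySem.List.enumerate_cons]
    simp only [List.foldl_cons, List.map_cons, ite_true]
    have h0 : (0 : Int) + 1 = ((0 : Nat) : Int) + 1 := by norm_num
    rw [h0, pvLoop rest 0 _ 0 (by simp [pvOffsetAt])]
    simp [pvOffsetAt]
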